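-- pv_equiv track=rewrite | github.com/gigagigohub/websoccer-player-search | scripts/fetch_updatefiles.py | parse_versions
-- ===== SOURCE A (Python) =====
-- def parse_versions(spec: str) -> list[int]:
--     vals: set[int] = set()
--     for chunk in (spec or "").split(","):
--         chunk = chunk.strip()
--         if not chunk:
--             continue
--         if "-" in chunk:
--             a, b = chunk.split("-", 1)
--             start, end = int(a), int(b)
--             if end < start:
--                 start, end = end, start
--             vals.update(range(start, end + 1))
--         else:
--             vals.add(int(chunk))
--     return sorted(vals)
-- ===== SOURCE B (Python) =====
-- def parse_versions(spec: str) -> list[int]: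
--     intervals = []
--     for chunk in (spec or "").split(","):
--         chunk = chunk.strip()
--         if not chunk:
--             continue
--         if "-" in chunk:
--             a, b = chunk.split("-", 1)
--             lo, hi = int(a), int(b)
--             if hi < lo:
--                 lo, hi = hi, lo
--         else:
--             lo = hi = int(chunk)
--         intervals.append((lo, hi))
--     intervals.sort(key=lambda t: t[0])
--     out: list[int] = []
--     for lo, hi in intervals:
--         start = lo if not out else max(lo, out[-1] + 1)
--         out.extend(range(start, hi + 1))
--     return out
-- ===== Notes on version B (the rewrite author's own statement) =====
-- stated objective: alternative
-- what changed: B replaces A's value set plus final sort of all expanded values by collecting one (lo,hi) interval per chunk, sorting the interval list by start, and emitting each interval's not-yet-covered tail in one increasing sweep, so the output is produced sorted and deduplicated without a set or a sort of the expanded values.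
import Mathlib
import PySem

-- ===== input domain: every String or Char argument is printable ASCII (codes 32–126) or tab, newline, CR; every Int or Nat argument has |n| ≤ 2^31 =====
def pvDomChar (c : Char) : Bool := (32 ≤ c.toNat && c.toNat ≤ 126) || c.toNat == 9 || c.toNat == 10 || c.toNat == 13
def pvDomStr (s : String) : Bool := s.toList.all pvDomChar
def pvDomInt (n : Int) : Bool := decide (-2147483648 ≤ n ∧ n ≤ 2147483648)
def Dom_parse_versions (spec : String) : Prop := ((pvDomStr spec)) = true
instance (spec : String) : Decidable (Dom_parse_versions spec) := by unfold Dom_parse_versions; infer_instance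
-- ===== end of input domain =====

-- B replaces A's value-set + final sort of all expanded values by sorting the small
-- interval list by start and emitting each interval's fresh part of the range in one
-- increasing sweep (objective: alternative decomposition, same exact result).

-- ===== PORT A =====
-- one loop iteration of A: strip, skip empties, range chunks go through split('-',1)
-- and update the set with range(start, end+1) (swapped if reversed), plain ints are added.
-- int() failures are excluded by Pre_; the port totalises them with .getD 0.
-- ('spec or ""' equals spec for every string, so it is ported as spec itself.)
def pvStepA (vals : PySem.Set Int) (chunk : List Char) : PySem.Set Int :=
  let c := PySem.Chars.strip chunk
  if c = [] then vals
  else if PySem.Chars.isIn ['-'] c then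
    match PySem.Chars.splitOnMax c ['-'] 1 with
    | [a, b] =>
      let start := (PySem.Int.ofChars? a).getD 0
      let stop  := (PySem.Int.ofChars? b).getD 0
      if stop < start then PySem.Set.update vals (PySem.List.pyRange stop (start + 1))
      else PySem.Set.update vals (PySem.List.pyRange start (stop + 1))
    | _ => vals  -- unreachable: split('-',1) of a chunk containing '-' has exactly 2 parts
  else PySem.Set.add vals ((PySem.Int.ofChars? c).getD 0)

def parse_versions (spec : String) : List Int :=
  PySem.List.sorted
    ((PySem.Chars.splitOn spec.toList [',']).foldl pvStepA PySem.Set.empty)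
    (fun x => x)

-- ===== PORT B =====
-- B's first loop: collect one (lo, hi) interval (lo ≤ hi) per non-empty chunk.
def pvStepI (acc : List (Int × Int)) (chunk : List Char) : List (Int × Int) :=
  let c := PySem.Chars.strip chunk
  if c = [] then acc
  else if PySem.Chars.isIn ['-'] c then
    match PySem.Chars.splitOnMax c ['-'] 1 with
    | [a, b] =>
      let lo := (PySem.Int.ofChars? a).getD 0
      let hi := (PySem.Int.ofChars? b).getD 0
      if hi < lo then acc ++ [(hi, lo)] else acc ++ [(lo, hi)]
    | _ => acc  -- unreachable, as in A's port
  else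
    let n := (PySem.Int.ofChars? c).getD 0
    acc ++ [(n, n)]

-- B's second loop: over intervals sorted by start, emit range(start, hi+1) where
-- start skips everything up to the last emitted value (out[-1] = getLast?).
def pvSweep (out : List Int) (p : Int × Int) : List Int :=
  let start := match out.getLast? with
    | none => p.1
    | some last => max p.1 (last + 1)
  out ++ PySem.List.pyRange start (p.2 + 1)

def parse_versions_alt (spec : String) : List Int :=
  let intervals := (PySem.Chars.splitOn spec.toList [',']).foldl pvStepI []
  (PySem.List.sorted intervals Prod.fst).foldl pvSweep []

-- ===== PRECONDITION & SPEC =====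
-- Pre_ excludes exactly the inputs where A raises ValueError: a non-empty stripped chunk
-- whose int() conversion fails ('', 'a', '-5' via the leading-'-' split, '1-2-3', '0x10', …).
def Pre_parse_versions (spec : String) : Prop :=
  ∀ chunk ∈ PySem.Chars.splitOn spec.toList [','],
    PySem.Chars.strip chunk ≠ [] →
    if PySem.Chars.isIn ['-'] (PySem.Chars.strip chunk) then
      ∀ p ∈ PySem.Chars.splitOnMax (PySem.Chars.strip chunk) ['-'] 1,
        (PySem.Int.ofChars? p).isSome = true
    else (PySem.Int.ofChars? (PySem.Chars.strip chunk)).isSome = true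
instance (spec : String) : Decidable (Pre_parse_versions spec) := by
  unfold Pre_parse_versions; infer_instance
def pvWitness_parse_versions : String := "3-1, 7,2,, 9-11"
def Spec_parse_versions (spec : String) (out : List Int) : Prop := out = parse_versions_alt spec
instance (spec : String) (out : List Int) : Decidable (Spec_parse_versions spec out) := by
  unfold Spec_parse_versions; infer_instance

-- ===== CLAIM (what is proved, stated in full; the proofs are below) =====
def Claim_equal_parse_versions : Prop := ∀ (spec : String), Dom_parse_versions spec → Pre_parse_versions spec → Spec_parse_versions spec (parse_versions spec)

-- ===== LEMMAS AND PROOFS =====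

-- x is covered by some interval of acc
def pvCover (acc : List (Int × Int)) (x : Int) : Prop := ∃ p ∈ acc, p.1 ≤ x ∧ x ≤ p.2

lemma pvRange_eq_nil {a b : Int} (h : ¬ a < b) : PySem.List.pyRange a b = [] := by
  apply List.eq_nil_iff_forall_not_mem.2
  intro x hx
  rw [PySem.List.mem_pyRange_one] at hx
  omega

lemma pvRange_pairwise : ∀ (n : Nat) (a b : Int), (b - a).toNat ≤ n →
    (PySem.List.pyRange a b).Pairwise (· < ·) := by
  intro n
  induction n with
  | zero =>
    intro a b h
    rw [pvRange_eq_nil (by omega)]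
    exact List.Pairwise.nil
  | succ m ih =>
    intro a b h
    by_cases hab : a < b
    · rw [PySem.List.pyRange_one_cons hab]
      refine List.Pairwise.cons ?_ (ih (a + 1) b (by omega))
      intro y hy
      rw [PySem.List.mem_pyRange_one] at hy
      omega
    · rw [pvRange_eq_nil hab]; exact List.Pairwise.nil

-- step alignment: A's set step and B's interval step keep the same covered values
lemma pvStep_mem (chunk : List Char) (s : PySem.Set Int) (acc : List (Int × Int))
    (h : ∀ x, x ∈ s ↔ pvCover acc x) :
    ∀ x, x ∈ pvStepA s chunk ↔ pvCover (pvStepI acc chunk) x := by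
  intro x
  unfold pvStepA pvStepI pvCover
  dsimp only
  by_cases hc : PySem.Chars.strip chunk = []
  · rw [if_pos hc, if_pos hc]; exact h x
  · rw [if_neg hc, if_neg hc]
    by_cases hin : PySem.Chars.isIn ['-'] (PySem.Chars.strip chunk) = true
    · rw [if_pos hin, if_pos hin]
      rcases hsp : PySem.Chars.splitOnMax (PySem.Chars.strip chunk) ['-'] 1 with _ | ⟨a, _ | ⟨b, _ | ⟨c, t⟩⟩⟩
      · exact h x
      · exact h x
      · dsimp only
        by_cases hlt : (PySem.Int.ofChars? b).getD 0 < (PySem.Int.ofChars? a).getD 0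
        · rw [if_pos hlt, if_pos hlt]
          constructor
          · intro hx
            rcases (PySem.Set.mem_update _ _ x).1 hx with hx | hx
            · obtain ⟨p, hp, hpx⟩ := (h x).1 hx
              exact ⟨p, List.mem_append.2 (Or.inl hp), hpx⟩
            · rw [PySem.List.mem_pyRange_one] at hx
              exact ⟨_, List.mem_append.2 (Or.inr (List.mem_singleton.2 rfl)), by dsimp; omega⟩
          · rintro ⟨p, hp, hpx⟩
            rcases List.mem_append.1 hp with hp | hp
            · exact (PySem.Set.mem_update _ _ x).2 (Or.inl ((h x).2 ⟨p, hp, hpx⟩))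
            · apply (PySem.Set.mem_update _ _ x).2
              right
              rw [PySem.List.mem_pyRange_one]
              rw [List.mem_singleton] at hp
              subst hp
              dsimp only at hpx
              omega
        · rw [if_neg hlt, if_neg hlt]
          constructor
          · intro hx
            rcases (PySem.Set.mem_update _ _ x).1 hx with hx | hx
            · obtain ⟨p, hp, hpx⟩ := (h x).1 hx
              exact ⟨p, List.mem_append.2 (Or.inl hp), hpx⟩
            · rw [PySem.List.mem_pyRange_one] at hx
              exact ⟨_, List.mem_append.2 (Or.inr (List.mem_singleton.2 rfl)), by dsimp; omega⟩
          · rintro ⟨p, hp, hpx⟩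
            rcases List.mem_append.1 hp with hp | hp
            · exact (PySem.Set.mem_update _ _ x).2 (Or.inl ((h x).2 ⟨p, hp, hpx⟩))
            · apply (PySem.Set.mem_update _ _ x).2
              right
              rw [PySem.List.mem_pyRange_one]
              rw [List.mem_singleton] at hp
              subst hp
              dsimp only at hpx
              omega
      · exact h x
    · rw [if_neg hin, if_neg hin]
      constructor
      · intro hx
        rcases (PySem.Set.mem_add _ _ x).1 hx with hx | hx
        · obtain ⟨p, hp, hpx⟩ := (h x).1 hx
          exact ⟨p, List.mem_append.2 (Or.inl hp), hpx⟩
        · exact ⟨_, List.mem_append.2 (Or.inr (List.mem_singleton.2 rfl)), by simp [hx]⟩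
      · rintro ⟨p, hp, hpx⟩
        rcases List.mem_append.1 hp with hp | hp
        · exact (PySem.Set.mem_add _ _ x).2 (Or.inl ((h x).2 ⟨p, hp, hpx⟩))
        · apply (PySem.Set.mem_add _ _ x).2
          right
          rw [List.mem_singleton] at hp
          subst hp
          dsimp only at hpx
          omega

lemma pvFold_mem : ∀ (cs : List (List Char)) (s : PySem.Set Int) (acc : List (Int × Int)),
    (∀ x, x ∈ s ↔ pvCover acc x) →
    ∀ x, x ∈ cs.foldl pvStepA s ↔ pvCover (cs.foldl pvStepI acc) x := by
  intro cs
  induction cs with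
  | nil => intro s acc h x; exact h x
  | cons c t ih => intro s acc h x; exact ih _ _ (pvStep_mem c s acc h) x

lemma pvStep_nodup (chunk : List Char) (s : PySem.Set Int) (h : s.Nodup) :
    (pvStepA s chunk).Nodup := by
  unfold pvStepA
  by_cases hc : PySem.Chars.strip chunk = []
  · rwa [if_pos hc]
  · rw [if_neg hc]
    by_cases hin : PySem.Chars.isIn ['-'] (PySem.Chars.strip chunk) = true
    · rw [if_pos hin]
      rcases PySem.Chars.splitOnMax (PySem.Chars.strip chunk) ['-'] 1 with _ | ⟨a, _ | ⟨b, _ | ⟨c, t⟩⟩⟩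
      · exact h
      · exact h
      · dsimp only
        split
        · exact PySem.Set.nodup_update _ _ h
        · exact PySem.Set.nodup_update _ _ h
      · exact h
    · rw [if_neg hin]
      exact PySem.Set.nodup_add _ _ h

lemma pvFold_nodup : ∀ (cs : List (List Char)) (s : PySem.Set Int), s.Nodup →
    (cs.foldl pvStepA s).Nodup := by
  intro cs
  induction cs with
  | nil => intro s h; exact h
  | cons c t ih => intro s h; exact ih _ (pvStep_nodup c s h)

lemma pvStep_lohi (chunk : List Char) (acc : List (Int × Int))
    (h : ∀ p ∈ acc, p.1 ≤ p.2) : ∀ p ∈ pvStepI acc chunk, p.1 ≤ p.2 := by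
  unfold pvStepI
  by_cases hc : PySem.Chars.strip chunk = []
  · rwa [if_pos hc]
  · rw [if_neg hc]
    by_cases hin : PySem.Chars.isIn ['-'] (PySem.Chars.strip chunk) = true
    · rw [if_pos hin]
      rcases PySem.Chars.splitOnMax (PySem.Chars.strip chunk) ['-'] 1 with _ | ⟨a, _ | ⟨b, _ | ⟨c, t⟩⟩⟩
      · exact h
      · exact h
      · dsimp only
        split
        · intro p hp
          rcases List.mem_append.1 hp with hp | hp
          · exact h p hp
          · simp at hp; subst hp; dsimp; omega
        · intro p hp
          rcases List.mem_append.1 hp with hp | hp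
          · exact h p hp
          · simp at hp; subst hp; dsimp; omega
      · exact h
    · rw [if_neg hin]
      intro p hp
      rcases List.mem_append.1 hp with hp | hp
      · exact h p hp
      · simp at hp; subst hp; simp

lemma pvFold_lohi : ∀ (cs : List (List Char)) (acc : List (Int × Int)),
    (∀ p ∈ acc, p.1 ≤ p.2) → ∀ p ∈ cs.foldl pvStepI acc, p.1 ≤ p.2 := by
  intro cs
  induction cs with
  | nil => intro acc h; exact h
  | cons c t ih => intro acc h; exact ih _ (pvStep_lohi c acc h)

-- invariant of B's sweep: over intervals sorted by start it produces exactly the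
-- strictly increasing enumeration of the covered values
lemma pvSweep_good : ∀ (rest processed : List (Int × Int)) (out : List Int),
    (∀ p ∈ rest, p.1 ≤ p.2) →
    (∀ p ∈ processed, ∀ q ∈ rest, p.1 ≤ q.1) →
    rest.Pairwise (fun p q => p.1 ≤ q.1) →
    out.Pairwise (· < ·) →
    (∀ x, x ∈ out ↔ pvCover processed x) →
    (∀ l, out.getLast? = some l → (∀ y ∈ out, y ≤ l) ∧ ∃ p ∈ processed, p.2 = l) →
    (rest.foldl pvSweep out).Pairwise (· < ·) ∧
      ∀ x, (x ∈ rest.foldl pvSweep out ↔ pvCover (processed ++ rest) x) := by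
  intro rest
  induction rest with
  | nil =>
    intro processed out _ _ _ h4 h5 _
    exact ⟨h4, by simpa using h5⟩
  | cons q rest ih =>
    intro processed out h1 h2 h3 h4 h5 h6
    obtain ⟨lo, hi⟩ := q
    have hlohi : lo ≤ hi := h1 (lo, hi) (List.mem_cons_self)
    -- the start value of this step
    set start : Int := (match out.getLast? with
      | none => lo
      | some last => max lo (last + 1)) with hstart
    have hstep : pvSweep out (lo, hi) = out ++ PySem.List.pyRange start (hi + 1) := rfl
    have hstart_lo : lo ≤ start := by
      rcases hlast : out.getLast? with _ | last <;> simp [hstart, hlast]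
    have hout_lt_start : ∀ y ∈ out, y < start := by
      intro y hy
      have hne : out ≠ [] := by rintro rfl; simp at hy
      rcases hlast : out.getLast? with _ | last
      · simp [List.getLast?_eq_none_iff] at hlast; exact absurd hlast hne
      · have := (h6 last hlast).1 y hy
        simp [hstart, hlast]; omega
    -- new out is still strictly increasing
    have h4' : (pvSweep out (lo, hi)).Pairwise (· < ·) := by
      rw [hstep, List.pairwise_append]
      refine ⟨h4, pvRange_pairwise (hi + 1 - start).toNat start (hi + 1) le_rfl, ?_⟩
      intro y hy z hz
      rw [PySem.List.mem_pyRange_one] at hz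
      exact lt_of_lt_of_le (hout_lt_start y hy) hz.1
    -- membership after this step
    have h5' : ∀ x, x ∈ pvSweep out (lo, hi) ↔ pvCover (processed ++ [(lo, hi)]) x := by
      intro x
      rw [hstep]
      simp only [List.mem_append, pvCover, List.mem_singleton, PySem.List.mem_pyRange_one]
      constructor
      · rintro (hx | hx)
        · obtain ⟨p, hp, hpx⟩ := (h5 x).1 hx
          exact ⟨p, Or.inl hp, hpx⟩
        · exact ⟨(lo, hi), Or.inr rfl, by dsimp; omega⟩
      · rintro ⟨p, hp | hp, hpx⟩
        · exact Or.inl ((h5 x).2 ⟨p, hp, hpx⟩)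
        · subst hp
          dsimp at hpx
          by_cases hxs : start ≤ x
          · right; omega
          · -- x below start: it is already in out, via the interval ending at out's last
            left
            have hne : out ≠ [] := by
              rintro rfl
              simp [hstart] at hxs
              omega
            rcases hlast : out.getLast? with _ | last
            · simp [List.getLast?_eq_none_iff] at hlast; exact absurd hlast hne
            · obtain ⟨p', hp', hp'2⟩ := (h6 last hlast).2
              have hxlast : x ≤ last := by
                simp [hstart, hlast] at hxs; omega
              have hp'1 : p'.1 ≤ lo := h2 p' hp' (lo, hi) List.mem_cons_self
              exact (h5 x).2 ⟨p', hp', by omega⟩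
    -- last element after this step
    have h6' : ∀ l, (pvSweep out (lo, hi)).getLast? = some l →
        (∀ y ∈ pvSweep out (lo, hi), y ≤ l) ∧ ∃ p ∈ processed ++ [(lo, hi)], p.2 = l := by
      intro l hl
      by_cases hr : start ≤ hi
      · have : PySem.List.pyRange start (hi + 1) = PySem.List.pyRange start hi ++ [hi] :=
          PySem.List.pyRange_one_succ_right hr
        rw [hstep, this, ← List.append_assoc, List.getLast?_concat] at hl
        obtain rfl : hi = l := by injection hl
        refine ⟨?_, (lo, hi), by simp, rfl⟩
        intro y hy
        rw [hstep, List.mem_append] at hy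
        rcases hy with hy | hy
        · have := hout_lt_start y hy; omega
        · rw [PySem.List.mem_pyRange_one] at hy; omega
      · have hnil : PySem.List.pyRange start (hi + 1) = [] := pvRange_eq_nil (by omega)
        rw [hstep, hnil, List.append_nil] at hl
        obtain ⟨hle, p, hp, hp2⟩ := h6 l hl
        refine ⟨?_, p, List.mem_append.2 (Or.inl hp), hp2⟩
        intro y hy
        rw [hstep, hnil, List.append_nil] at hy
        exact hle y hy
    have := ih (processed ++ [(lo, hi)]) (pvSweep out (lo, hi))
      (fun p hp => h1 p (List.mem_cons_of_mem _ hp))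
      (by
        intro p hp r hr
        rcases List.mem_append.1 hp with hp | hp
        · exact h2 p hp r (List.mem_cons_of_mem _ hr)
        · simp at hp; subst hp
          exact (List.pairwise_cons.1 h3).1 r hr)
      ((List.pairwise_cons.1 h3).2) h4' h5' h6'
    rw [List.foldl_cons]
    refine ⟨this.1, fun x => ?_⟩
    rw [this.2 x]
    unfold pvCover
    constructor
    · rintro ⟨p, hp, hpx⟩
      refine ⟨p, ?_, hpx⟩
      simp only [List.mem_append, List.mem_cons] at hp ⊢
      tauto
    · rintro ⟨p, hp, hpx⟩
      refine ⟨p, ?_, hpx⟩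
      simp only [List.mem_append, List.mem_cons] at hp ⊢
      tauto

-- ===== VERDICT (by name: the statement is the Claim_ definition above) =====
theorem parse_versions_spec : Claim_equal_parse_versions := by
  intro spec _ _
  unfold Spec_parse_versions parse_versions parse_versions_alt
  set cs := PySem.Chars.splitOn spec.toList [','] with hcs
  set S := cs.foldl pvStepA PySem.Set.empty with hS
  set I := cs.foldl pvStepI [] with hI
  set J := PySem.List.sorted I Prod.fst with hJ
  have hmemJ : ∀ p, p ∈ J ↔ p ∈ I := fun p => PySem.List.mem_sorted I Prod.fst false p
  have hmemS : ∀ x, x ∈ S ↔ pvCover I x := by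
    intro x
    exact pvFold_mem cs PySem.Set.empty [] (by intro y; simp [PySem.Set.empty, pvCover]) x
  have hgood := pvSweep_good J [] []
    (fun p hp => pvFold_lohi cs [] (by simp) p ((hmemJ p).1 hp))
    (by simp)
    (PySem.List.sorted_pairwise I Prod.fst)
    List.Pairwise.nil
    (by intro x; simp [pvCover])
    (by intro l hl; simp at hl)
  have hmemRes : ∀ x, x ∈ J.foldl pvSweep [] ↔ x ∈ S := by
    intro x
    rw [hgood.2 x, hmemS x]
    constructor
    · rintro ⟨p, hp, hpx⟩
      exact ⟨p, (hmemJ p).1 (by simpa using hp), hpx⟩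
    · rintro ⟨p, hp, hpx⟩
      exact ⟨p, by simpa using (hmemJ p).2 hp, hpx⟩
  have hperm : (J.foldl pvSweep []).Perm S := by
    rw [List.perm_ext_iff_of_nodup
      (List.Pairwise.imp ne_of_lt hgood.1)
      (pvFold_nodup cs PySem.Set.empty (by simp [PySem.Set.empty]))]
    exact hmemRes
  show (PySem.List.sorted S fun x => x) = List.foldl pvSweep [] J
  have hfin := PySem.List.sorted_eq_of_perm_of_pairwise_lt S (J.foldl pvSweep []) (fun x => x)
    hperm hgood.1
  rw [hfin]
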